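-- pv_equiv track=rewrite | github.com/olvjudith/Control-de-versiones-de-proyecto-formacion-dual | Algoritmos/maze_generator.py | generate_raw_maze
-- ===== SOURCE A (Python) =====
-- WALL = "#"
--
-- HALL = " "
--
-- def absolute_coordinate(row, col):
--     abs_row = (row*2) + 1
--     abs_col = (col*2) + 1
--     return (abs_row, abs_col)
--
-- def generate_raw_maze(rows, cols):
--     n_rows = (rows*2) + 1
--     n_cols = (cols*2) + 1
--
--     maze = [[WALL]*n_cols for _ in range(n_rows)]
--
--     for i in range(rows):
--         for j in range(cols):
--             abs_row, abs_col = absolute_coordinate(i,j)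
--             maze[abs_row][abs_col] = HALL
--
--     return maze
-- ===== SOURCE B (Python) =====
-- WALL = "#"
--
-- HALL = " "
--
-- def generate_raw_maze(rows, cols):
--     return [[HALL if (r % 2 == 1 and c % 2 == 1) else WALL
--              for c in range(cols*2 + 1)]
--             for r in range(rows*2 + 1)]
-- ===== Notes on version B (the rewrite author's own statement) =====
-- stated objective: simpler
-- what changed: Replaces A's two-phase build (fill a grid with walls, then a second nested loop overwriting each hall cell through absolute_coordinate) with a single nested comprehension that decides every cell directly from the parity of its coordinates.
import Mathlib
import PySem

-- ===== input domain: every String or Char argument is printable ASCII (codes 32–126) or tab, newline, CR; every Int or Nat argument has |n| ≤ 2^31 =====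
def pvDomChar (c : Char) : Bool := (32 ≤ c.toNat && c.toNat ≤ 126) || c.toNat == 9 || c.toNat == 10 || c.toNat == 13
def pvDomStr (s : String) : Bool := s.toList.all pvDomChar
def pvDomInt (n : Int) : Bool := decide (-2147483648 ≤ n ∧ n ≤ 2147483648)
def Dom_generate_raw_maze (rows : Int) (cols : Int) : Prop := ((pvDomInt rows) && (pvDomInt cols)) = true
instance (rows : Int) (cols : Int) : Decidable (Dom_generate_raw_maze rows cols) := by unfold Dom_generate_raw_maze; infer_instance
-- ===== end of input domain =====

-- B builds each cell directly from a coordinate-parity test in one nested comprehension,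
-- instead of A's two-phase "fill with walls, then overwrite the hall cells" (objective: simpler).

-- ===== PORT A =====
def absolute_coordinate (row : Int) (col : Int) : Int × Int :=
  ((row * 2) + 1, (col * 2) + 1)

def generate_raw_maze (rows : Int) (cols : Int) : List (List String) :=
  let n_rows := rows * 2 + 1
  let n_cols := cols * 2 + 1
  -- [[WALL]*n_cols for _ in range(n_rows)]  (pyRepeat = Python list repetition)
  let maze := (PySem.List.pyRange 0 n_rows).map (fun _ => PySem.List.pyRepeat ["#"] n_cols)
  -- maze[abs_row][abs_col] = HALL — both indices are always in range here, so the total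
  -- read/write forms pyGetD/pySetD are exact
  (PySem.List.pyRange 0 rows).foldl (fun maze i =>
    (PySem.List.pyRange 0 cols).foldl (fun maze j =>
      let ac := absolute_coordinate i j
      PySem.List.pySetD maze ac.1
        (PySem.List.pySetD (PySem.List.pyGetD maze ac.1 []) ac.2 " ")) maze) maze

-- ===== PORT B =====
def generate_raw_maze_alt (rows : Int) (cols : Int) : List (List String) :=
  (PySem.List.pyRange 0 (rows * 2 + 1)).map (fun r =>
    (PySem.List.pyRange 0 (cols * 2 + 1)).map (fun c =>
      if PySem.Int.mod r 2 = 1 ∧ PySem.Int.mod c 2 = 1 then " " else "#"))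

-- ===== PRECONDITION & SPEC =====
def Spec_generate_raw_maze (rows : Int) (cols : Int) (out : List (List String)) : Prop := out = generate_raw_maze_alt rows cols
instance (rows : Int) (cols : Int) (out : List (List String)) : Decidable (Spec_generate_raw_maze rows cols out) := by unfold Spec_generate_raw_maze; infer_instance

-- ===== CLAIM (what is proved, stated in full; the proofs are below) =====
def Claim_equal_generate_raw_maze : Prop := ∀ (rows : Int) (cols : Int), Dom_generate_raw_maze rows cols → Spec_generate_raw_maze rows cols (generate_raw_maze rows cols)

-- ===== LEMMAS AND PROOFS =====

-- the all-wall row, as A builds it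
def wallRow (cols : Int) : List String := List.replicate (cols * 2 + 1).toNat "#"

-- the row A's inner loop produces (halls at odd columns)
def hallRow (cols : Int) : List String :=
  (PySem.List.pyRange 0 (cols * 2 + 1)).map (fun c => if c % 2 = 1 then " " else "#")

-- a constant map over a range is replicate
lemma map_pyRange_const {α : Type} (n : Int) (x : α) :
    (PySem.List.pyRange 0 n).map (fun _ => x) = List.replicate n.toNat x := by
  rcases (show n ≤ 0 ∨ 0 < n by omega) with h | h
  · simp [PySem.List.pyRange_one_eq_nil h, Int.toNat_of_nonpos h]
  · have h2 : n = ((n.toNat : Nat) : Int) := by omega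
    rw [h2, PySem.List.pyRange_zero_natCast, List.map_map]
    simp only [Function.comp_def]
    rw [List.map_const', List.length_range]
    congr 1

-- consecutive read-modify-writes at the SAME (in-range) row index collapse to one write
lemma foldl_setD_same (l : List Int) (a : Int) (d : List String) :
    ∀ (mz : List (List String)), 0 ≤ a → a.toNat < mz.length →
    l.foldl (fun mz j => PySem.List.pySetD mz a
        (PySem.List.pySetD (PySem.List.pyGetD mz a d) (j * 2 + 1) " ")) mz
      = PySem.List.pySetD mz a
          (l.foldl (fun row j => PySem.List.pySetD row (j * 2 + 1) " ")
            (PySem.List.pyGetD mz a d)) := by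
  induction l with
  | nil =>
    intro mz ha hlen
    simp only [List.foldl_nil, PySem.List.pySetD_of_nonneg _ _ ha,
      PySem.List.pyGetD_of_nonneg _ _ ha, List.getD_eq_getElem _ _ hlen,
      List.set_getElem_self]
  | cons x l ih =>
    intro mz ha hlen
    simp only [List.foldl_cons]
    rw [ih _ ha (by simp [PySem.List.length_pySetD, hlen])]
    rw [PySem.List.pySetD_of_nonneg _ _ ha, PySem.List.pySetD_of_nonneg _ _ ha,
      PySem.List.pySetD_of_nonneg _ _ ha, PySem.List.pyGetD_of_nonneg _ _ ha,
      PySem.List.pyGetD_of_nonneg _ _ ha, List.set_set]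
    congr 2
    rw [List.getD_eq_getElem _ _ (by simpa using hlen), List.getElem_set_self,
      List.getD_eq_getElem _ _ hlen]

-- A's inner loop over range(0, m) on an all-wall row: halls at odd columns below 2*m
lemma inner_fold_partial (cols : Int) (m : Nat) (hm : (m : Int) ≤ cols) :
    (PySem.List.pyRange 0 (m : Int)).foldl
        (fun row j => PySem.List.pySetD row (j * 2 + 1) " ") (wallRow cols)
      = (PySem.List.pyRange 0 (cols * 2 + 1)).map
          (fun c => if c % 2 = 1 ∧ c < 2 * (m : Int) then " " else "#") := by
  induction m with
  | zero =>
    rw [PySem.List.pyRange_one_eq_nil (by omega)]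
    simp only [List.foldl_nil, wallRow]
    rw [← map_pyRange_const (cols * 2 + 1) "#"]
    apply List.map_congr_left
    intro c hc
    rw [PySem.List.mem_pyRange_one] at hc
    simp only [Nat.cast_zero]
    rw [if_neg (by omega)]
  | succ k ih =>
    have hk : (k : Int) ≤ cols := by push_cast at hm ⊢; omega
    have hsplit : PySem.List.pyRange 0 ((k + 1 : Nat) : Int)
        = PySem.List.pyRange 0 (k : Int) ++ [(k : Int)] := by
      rw [show ((k + 1 : Nat) : Int) = (k : Int) + 1 by push_cast; ring]
      exact PySem.List.pyRange_one_succ_right (by positivity)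
    rw [hsplit, List.foldl_append, List.foldl_cons, List.foldl_nil, ih hk]
    rw [PySem.List.pySetD_of_nonneg _ _ (by positivity)]
    apply List.ext_getElem
    · simp
    · intro i h1 h2
      rw [List.getElem_set]
      simp only [List.getElem_map, PySem.List.getElem_pyRange_one, zero_add]
      have hi : (i : Int) < cols * 2 + 1 := by
        have := h2; simp [PySem.List.length_pyRange_one] at this; omega
      have hmod : ∀ z : Int, z % 2 = 1 ↔ ¬ (2 ∣ z) := by omega
      by_cases hcase : ((k : Int) * 2 + 1).toNat = i
      · have hio : (i : Int) = (k : Int) * 2 + 1 := by omega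
        rw [if_pos hcase, eq_comm, if_pos (by push_cast; omega)]
      · rw [if_neg hcase]
        have hne : (i : Int) ≠ (k : Int) * 2 + 1 := by omega
        have heq : ((i : Int) % 2 = 1 ∧ (i : Int) < 2 * ((k : Int) : Int)) ↔
               ((i : Int) % 2 = 1 ∧ (i : Int) < 2 * (((k : Int)) + 1)) := by omega
        push_cast
        push_cast at heq
        rw [if_congr heq rfl rfl]

-- A's full inner loop turns an all-wall row into the hall row, for every cols
lemma inner_fold (cols : Int) :
    (PySem.List.pyRange 0 cols).foldl
        (fun row j => PySem.List.pySetD row (j * 2 + 1) " ") (wallRow cols)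
      = hallRow cols := by
  rcases (show cols ≤ 0 ∨ 0 < cols by omega) with h | h
  · rcases lt_or_eq_of_le h with h' | h'
    · rw [PySem.List.pyRange_one_eq_nil (le_of_lt h')]
      simp [wallRow, hallRow, PySem.List.pyRange_one_eq_nil (show cols * 2 + 1 ≤ 0 by omega),
        Int.toNat_of_nonpos (show cols * 2 + 1 ≤ 0 by omega)]
    · subst h'
      rw [PySem.List.pyRange_one_eq_nil (by omega)]
      simp only [List.foldl_nil, wallRow, hallRow]
      rw [← map_pyRange_const (0 * 2 + 1) "#"]
      apply List.map_congr_left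
      intro c hc
      rw [PySem.List.mem_pyRange_one] at hc
      have : c = 0 := by omega
      simp [this]
  · have h1 := inner_fold_partial cols cols.toNat (by omega)
    rw [show ((cols.toNat : Nat) : Int) = cols by omega] at h1
    rw [h1, hallRow]
    apply List.map_congr_left
    intro c hcm
    rw [PySem.List.mem_pyRange_one] at hcm
    have hiff : (c % 2 = 1 ∧ c < 2 * cols) ↔ c % 2 = 1 := by omega
    rw [if_congr hiff rfl rfl]

-- A's outer loop over range(0, m): hall rows at odd row indices below 2*m
lemma outer_fold_partial (rows cols : Int) (m : Nat) (hm : (m : Int) ≤ rows) :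
    (PySem.List.pyRange 0 (m : Int)).foldl (fun maze i =>
        (PySem.List.pyRange 0 cols).foldl (fun maze j =>
          PySem.List.pySetD maze (i * 2 + 1)
            (PySem.List.pySetD (PySem.List.pyGetD maze (i * 2 + 1) []) (j * 2 + 1) " ")) maze)
      ((PySem.List.pyRange 0 (rows * 2 + 1)).map (fun _ => wallRow cols))
      = (PySem.List.pyRange 0 (rows * 2 + 1)).map
          (fun r => if r % 2 = 1 ∧ r < 2 * (m : Int) then hallRow cols else wallRow cols) := by
  induction m with
  | zero =>
    rw [show PySem.List.pyRange 0 (((0 : Nat) : Nat) : Int) = []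
      from PySem.List.pyRange_one_eq_nil (by omega)]
    simp only [List.foldl_nil]
    apply List.map_congr_left
    intro r hr
    rw [PySem.List.mem_pyRange_one] at hr
    simp only [Nat.cast_zero]
    rw [if_neg (by omega)]
  | succ k ih =>
    have hk : (k : Int) ≤ rows := by push_cast at hm ⊢; omega
    have hm' : (k : Int) + 1 ≤ rows := by push_cast at hm ⊢; omega
    have hsplit : PySem.List.pyRange 0 ((k + 1 : Nat) : Int)
        = PySem.List.pyRange 0 (k : Int) ++ [(k : Int)] := by
      rw [show ((k + 1 : Nat) : Int) = (k : Int) + 1 by push_cast; ring]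
      exact PySem.List.pyRange_one_succ_right (by positivity)
    rw [hsplit, List.foldl_append, List.foldl_cons, List.foldl_nil, ih hk]
    have hrowslen : ((PySem.List.pyRange 0 (rows * 2 + 1)).map
        (fun r => if r % 2 = 1 ∧ r < 2 * (k : Int) then hallRow cols else wallRow cols)).length
        = (rows * 2 + 1).toNat := by
      simp [PySem.List.length_pyRange_one]
    have hidx : ((k : Int) * 2 + 1).toNat < (rows * 2 + 1).toNat := by omega
    rw [foldl_setD_same _ _ _ _ (by positivity) (by rw [hrowslen]; exact hidx)]
    rw [PySem.List.pyGetD_map_pyRange_of_nonneg _ _ _ _ (by positivity) (by omega)]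
    rw [if_neg (by omega)]
    rw [inner_fold cols]
    rw [PySem.List.pySetD_of_nonneg _ _ (by positivity)]
    apply List.ext_getElem
    · simp
    · intro i h1 h2
      rw [List.getElem_set]
      simp only [List.getElem_map, PySem.List.getElem_pyRange_one, zero_add]
      by_cases hcase : ((k : Int) * 2 + 1).toNat = i
      · have hio : (i : Int) = (k : Int) * 2 + 1 := by omega
        rw [if_pos hcase, eq_comm, if_pos (by push_cast; omega)]
      · rw [if_neg hcase]
        have hne : (i : Int) ≠ (k : Int) * 2 + 1 := by omega
        have heq : ((i : Int) % 2 = 1 ∧ (i : Int) < 2 * ((k : Int) : Int)) ↔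
               ((i : Int) % 2 = 1 ∧ (i : Int) < 2 * (((k : Int)) + 1)) := by omega
        push_cast
        push_cast at heq
        rw [if_congr heq rfl rfl]

-- ===== VERDICT (by name: the statement is the Claim_ definition above) =====
theorem generate_raw_maze_spec : Claim_equal_generate_raw_maze := by
  intro rows cols _
  show generate_raw_maze rows cols = generate_raw_maze_alt rows cols
  unfold generate_raw_maze generate_raw_maze_alt absolute_coordinate
  simp only [PySem.List.pyRepeat_singleton]
  rcases (show rows < 0 ∨ 0 ≤ rows by omega) with hneg | hpos
  · rw [PySem.List.pyRange_one_eq_nil (le_of_lt hneg),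
      PySem.List.pyRange_one_eq_nil (show rows * 2 + 1 ≤ 0 by omega)]
    simp
  · have houter := outer_fold_partial rows cols rows.toNat (by omega)
    rw [show ((rows.toNat : Nat) : Int) = rows by omega] at houter
    simp only [wallRow] at houter
    rw [houter]
    apply List.map_congr_left
    intro r hrm
    rw [PySem.List.mem_pyRange_one] at hrm
    have h2 : PySem.Int.mod r 2 = r % 2 := PySem.Int.mod_eq_emod_of_pos (by omega)
    by_cases hodd : r % 2 = 1
    · rw [if_pos ⟨hodd, by omega⟩, hallRow]
      apply List.map_congr_left
      intro c hcm
      rw [PySem.List.mem_pyRange_one] at hcm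
      rw [h2, PySem.Int.mod_eq_emod_of_pos (show (0:Int) < 2 by omega)]
      simp [hodd]
    · rw [if_neg (by tauto)]
      rw [← map_pyRange_const (cols * 2 + 1) "#"]
      apply List.map_congr_left
      intro c hcm
      rw [h2]
      rw [if_neg (by tauto)]
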